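-- pv_equiv track=rewrite | github.com/Robert-N7/hotkeys | stubs/transform_case.py | _transform_upper
-- ===== SOURCE A (Python) =====
-- def _transform_upper(text, transform_first):
--     new = ''
--     upper_next = transform_first
--     for c in text:
--         if c in ('_', ',', ' '):
--             upper_next = True
--         elif upper_next:
--             new += c.upper()
--             upper_next = False
--         else:
--             new += c
--     return new
-- ===== SOURCE B (Python) =====
-- def _transform_upper(text, transform_first):
--     seps = {'_', ',', ' '}
--     prevs = [None] + list(text[:-1])
--     return ''.join(
--         (c.upper() if (transform_first if p is None else p in seps) else c)
--         for p, c in zip(prevs, text) if c not in seps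
--     )
-- ===== Notes on version B (the rewrite author's own statement) =====
-- stated objective: alternative
-- what changed: Replaces A's stateful single-pass scan (carrying an upper_next flag) with a stateless zip-with-previous comprehension: each non-separator character is uppercased iff its predecessor is a separator (or it is the first character and transform_first).
import Mathlib
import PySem

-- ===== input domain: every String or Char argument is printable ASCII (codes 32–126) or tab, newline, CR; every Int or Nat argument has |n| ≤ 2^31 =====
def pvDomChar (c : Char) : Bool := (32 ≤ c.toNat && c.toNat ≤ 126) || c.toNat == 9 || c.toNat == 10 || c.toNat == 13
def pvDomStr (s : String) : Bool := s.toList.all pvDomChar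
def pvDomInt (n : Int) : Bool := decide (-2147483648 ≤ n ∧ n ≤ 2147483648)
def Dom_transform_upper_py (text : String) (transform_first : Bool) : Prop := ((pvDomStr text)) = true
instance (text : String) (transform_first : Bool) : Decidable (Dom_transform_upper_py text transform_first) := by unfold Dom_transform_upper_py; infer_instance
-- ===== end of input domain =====

-- B replaces A's stateful upper_next scan by a stateless zip-with-previous comprehension (alternative decomposition, same cost).

-- ===== PORT A =====
-- literal port of A: fold over the characters with state (new, upper_next)
def transform_upper_py (text : String) (transform_first : Bool) : String :=
  String.ofList (text.toList.foldl (fun (st : List Char × Bool) c =>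
    if c = '_' ∨ c = ',' ∨ c = ' ' then (st.1, true)
    else if st.2 then (st.1 ++ [PySem.Chars.upperChar c], false)
    else (st.1 ++ [c], false)) ([], transform_first)).1

-- ===== PORT B =====
-- port of Source B: pair each character with its predecessor (none for the first),
-- keep the non-separators, uppercase those whose predecessor is a separator
-- (the first one iff transform_first), and join.
def pvIsSep (c : Char) : Bool := c ∈ ['_', ',', ' ']     -- 'p in seps'

def pvDec (transform_first : Bool) (p? : Option Char) : Bool :=     -- 'transform_first if p is None else p in seps'
  p?.elim transform_first pvIsSep

def transform_upper_py_alt (text : String) (transform_first : Bool) : String :=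
  String.ofList ((((none :: (PySem.Str.slice text none (some (-1))).toList.map some).zip
      text.toList).filter (fun pc => !pvIsSep pc.2)).map (fun pc =>
    if pvDec transform_first pc.1 then PySem.Chars.upperChar pc.2 else pc.2))

-- ===== PRECONDITION & SPEC =====
def Spec_transform_upper_py (text : String) (transform_first : Bool) (out : String) : Prop := out = transform_upper_py_alt text transform_first
instance (text : String) (transform_first : Bool) (out : String) : Decidable (Spec_transform_upper_py text transform_first out) := by unfold Spec_transform_upper_py; infer_instance

-- ===== CLAIM (what is proved, stated in full; the proofs are below) =====
def Claim_equal_transform_upper_py : Prop := ∀ (text : String) (transform_first : Bool), Dom_transform_upper_py text transform_first → Spec_transform_upper_py text transform_first (transform_upper_py text transform_first)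

-- ===== LEMMAS AND PROOFS =====

-- A's loop, written as structural recursion on the characters
def pvGoA (cs : List Char) (u : Bool) : List Char :=
  match cs with
  | [] => []
  | c :: rest =>
    if c = '_' ∨ c = ',' ∨ c = ' ' then pvGoA rest true
    else (if u then PySem.Chars.upperChar c else c) :: pvGoA rest false

theorem pvGoA_foldl (cs : List Char) (acc : List Char) (u : Bool) :
    (cs.foldl (fun (st : List Char × Bool) c =>
      if c = '_' ∨ c = ',' ∨ c = ' ' then (st.1, true)
      else if st.2 then (st.1 ++ [PySem.Chars.upperChar c], false)
      else (st.1 ++ [c], false)) (acc, u)).1 = acc ++ pvGoA cs u := by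
  induction cs generalizing acc u with
  | nil => simp [pvGoA]
  | cons c rest ih =>
    by_cases h : c = '_' ∨ c = ',' ∨ c = ' '
    · simp [pvGoA, h, List.foldl_cons, ih]
    · cases u <;> simp [pvGoA, h, List.foldl_cons, ih]

theorem pvIsSep_iff (c : Char) : pvIsSep c = true ↔ (c = '_' ∨ c = ',' ∨ c = ' ') := by
  simp [pvIsSep]

-- the state A's loop carries into the tail after a char c is exactly pvIsSep c
theorem pvGoA_step (c : Char) (rest : List Char) (u : Bool) :
    pvGoA (c :: rest) u =
      (if pvIsSep c then [] else [if u then PySem.Chars.upperChar c else c]) ++ pvGoA rest (pvIsSep c) := by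
  by_cases h : c = '_' ∨ c = ',' ∨ c = ' '
  · have hs : pvIsSep c = true := (pvIsSep_iff c).mpr h
    simp [pvGoA, h, hs]
  · have hs : pvIsSep c = false := by
      cases hb : pvIsSep c
      · rfl
      · exact absurd ((pvIsSep_iff c).mp hb) h
    simp [pvGoA, h, hs]

-- the zip-with-previous comprehension computes exactly A's scan
theorem pvZip_eq (transform_first : Bool) (cs : List Char) (p? : Option Char) :
    (((p? :: cs.dropLast.map some).zip cs).filter (fun pc => !pvIsSep pc.2)).map (fun pc =>
      if pvDec transform_first pc.1 then PySem.Chars.upperChar pc.2 else pc.2)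
    = pvGoA cs (pvDec transform_first p?) := by
  induction cs generalizing p? with
  | nil => simp [pvGoA]
  | cons c rest ih =>
    cases rest with
    | nil =>
      rw [pvGoA_step]
      by_cases hs : pvIsSep c
      · simp [hs, pvGoA]
      · simp [hs, pvGoA]
    | cons r rs =>
      have hd : (c :: r :: rs).dropLast = c :: (r :: rs).dropLast := rfl
      rw [hd, pvGoA_step]
      have ihc := ih (some c)
      rw [show pvDec transform_first (some c) = pvIsSep c from rfl] at ihc
      simp only [List.zip_cons_cons, List.filter_cons] at ihc
      by_cases hs : pvIsSep c
      · rw [hs] at ihc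
        simp only [hs, if_true, List.nil_append, List.map_cons, List.zip_cons_cons,
          List.filter_cons, Bool.not_true, Bool.false_eq_true, if_false]
        exact ihc
      · have hs' : pvIsSep c = false := by
          cases hb : pvIsSep c
          · rfl
          · exact absurd hb hs
        rw [hs'] at ihc
        simp only [hs', Bool.false_eq_true, if_false, List.singleton_append, List.map_cons,
          List.zip_cons_cons, List.filter_cons, Bool.not_false, if_true]
        rw [ihc]

-- ===== VERDICT (by name: the statement is the Claim_ definition above) =====
theorem transform_upper_py_spec : Claim_equal_transform_upper_py := by
  intro text transform_first _
  unfold Spec_transform_upper_py transform_upper_py transform_upper_py_alt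
  rw [PySem.Str.slice_to_neg_one text]
  rw [pvGoA_foldl]
  rw [pvZip_eq transform_first text.toList none]
  rfl
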